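-- pv_equiv track=rewrite | github.com/earthPerson-001/algorithms-lab | src/exam/sorting_in_linear_time.py | digit_extractor
-- ===== SOURCE A (Python) =====
-- def digit_extractor(number, to_extract):
--     "extracts the nth digit from right"
--     digit = number
--     remainder = 0
--     for i in range(0, to_extract):
--         remainder = digit % 10
--         if i < to_extract - 1:
--             digit = digit // 10
--
--     return remainder
-- ===== SOURCE B (Python) =====
-- def digit_extractor(number, to_extract):
--     "extracts the nth digit from right"
--     if to_extract <= 0:
--         return 0
--     return (number // 10 ** (to_extract - 1)) % 10
-- ===== Notes on version B (the rewrite author's own statement) =====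
-- stated objective: simpler
-- what changed: Replaces the loop of repeated //10 steps with the single closed-form expression (number // 10**(to_extract-1)) % 10 (0 when to_extract <= 0, where A's loop runs zero times).
import Mathlib
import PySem

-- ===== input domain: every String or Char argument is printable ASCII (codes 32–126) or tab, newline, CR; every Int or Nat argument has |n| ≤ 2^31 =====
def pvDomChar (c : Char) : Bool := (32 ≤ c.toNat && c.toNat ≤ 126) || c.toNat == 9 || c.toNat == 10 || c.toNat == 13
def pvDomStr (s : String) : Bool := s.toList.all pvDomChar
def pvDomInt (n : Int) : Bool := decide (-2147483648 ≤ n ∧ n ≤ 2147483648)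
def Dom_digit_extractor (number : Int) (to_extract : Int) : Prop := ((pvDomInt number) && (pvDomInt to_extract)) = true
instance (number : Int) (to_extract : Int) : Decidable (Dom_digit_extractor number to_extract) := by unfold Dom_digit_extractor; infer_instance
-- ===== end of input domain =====

-- B computes the digit with one closed-form floor-division/mod expression instead of A's loop of //10 steps (simpler; not claimed faster).


-- ===== PORT A =====
-- the for-loop over range(0, to_extract): fuel counts remaining iterations, i is the loop index
def digitLoopA (t : Int) (i : Nat) (fuel : Nat) (digit rem : Int) : Int :=
  match fuel with
  | 0 => rem
  | f + 1 =>
    let rem' := PySem.Int.mod digit 10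
    let digit' := if (i : Int) < t - 1 then PySem.Int.floordiv digit 10 else digit
    digitLoopA t (i + 1) f digit' rem'

def digit_extractor (number : Int) (to_extract : Int) : Int :=
  digitLoopA to_extract 0 to_extract.toNat number 0

-- ===== PORT B =====
def digit_extractor_alt (number : Int) (to_extract : Int) : Int :=
  if to_extract ≤ 0 then 0
  else PySem.Int.mod (PySem.Int.floordiv number (10 ^ (to_extract - 1).toNat)) 10

-- ===== PRECONDITION & SPEC =====
def Spec_digit_extractor (number : Int) (to_extract : Int) (out : Int) : Prop := out = digit_extractor_alt number to_extract
instance (number : Int) (to_extract : Int) (out : Int) : Decidable (Spec_digit_extractor number to_extract out) := by unfold Spec_digit_extractor; infer_instance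

-- ===== CLAIM (what is proved, stated in full; the proofs are below) =====
def Claim_equal_digit_extractor : Prop := ∀ (number : Int) (to_extract : Int), Dom_digit_extractor number to_extract → Spec_digit_extractor number to_extract (digit_extractor number to_extract)

-- ===== LEMMAS AND PROOFS =====

lemma digitLoopA_succ (t : Int) (i f : Nat) (digit rem : Int) :
    digitLoopA t i (f + 1) digit rem
      = digitLoopA t (i + 1) f
          (if (i : Int) < t - 1 then PySem.Int.floordiv digit 10 else digit)
          (PySem.Int.mod digit 10) := rfl

lemma floordiv_eq_fdiv (a b : Int) : PySem.Int.floordiv a b = Int.fdiv a b := rfl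

-- loop invariant: with f+1 iterations left and i + f + 1 = t, the loop returns (digit // 10^f) % 10
lemma digitLoopA_closed (t : Int) : ∀ (f : Nat) (i : Nat) (digit rem : Int),
    (i : Int) + f + 1 = t →
    digitLoopA t i (f + 1) digit rem
      = PySem.Int.mod (PySem.Int.floordiv digit (10 ^ f)) 10 := by
  intro f
  induction f with
  | zero =>
    intro i digit rem h
    rw [digitLoopA_succ]
    simp only [digitLoopA]
    have hi : ¬ ((i : Int) < t - 1) := by omega
    simp
  | succ f ih =>
    intro i digit rem h
    have hi : (i : Int) < t - 1 := by omega
    rw [digitLoopA_succ, if_pos hi]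
    rw [ih (i + 1) _ _ (by push_cast; omega)]
    simp only [floordiv_eq_fdiv]
    rw [Int.fdiv_fdiv_eq_fdiv_mul digit (by norm_num) (by positivity)]
    congr 1
    rw [pow_succ, mul_comm]

-- ===== VERDICT (by name: the statement is the Claim_ definition above) =====
theorem digit_extractor_spec : Claim_equal_digit_extractor := by
  intro number t _
  unfold Spec_digit_extractor digit_extractor digit_extractor_alt
  by_cases ht : t ≤ 0
  · have : t.toNat = 0 := by omega
    simp [this, digitLoopA, ht]
  · have h1 : 1 ≤ t := by omega
    have hf : t.toNat = (t - 1).toNat + 1 := by omega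
    rw [hf, digitLoopA_closed t ((t - 1).toNat) 0 number 0 (by push_cast; omega)]
    simp [ht]
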